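-- pv_equiv track=rewrite | github.com/sadanandv/CS5001EvolutionaryComputing | Unit 1/Pipeline.py | branch_and_bound_heuristic
-- ===== SOURCE A (Python) =====
-- from typing import List, Tuple, Dict
-- from heapq import heappush, heappop
--
-- def branch_and_bound_heuristic(graph: Dict[str, List[str]], start: str, goal: str, heuristic: Dict[str, int]) -> List[str]:
--     pq = [(heuristic[start], [start])]
--
--     while pq:
--         cost, current_path = heappop(pq)
--         current_node = current_path[-1]
--
--         if current_node == goal:
--             return current_path
--
--         for neighbor in graph.get(current_node, []):
--             if neighbor not in current_path:
--                 new_path = current_path + [neighbor]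
--                 new_cost = cost + heuristic.get(neighbor, 0)
--                 heappush(pq, (new_cost, new_path))
--
--     return None
-- ===== SOURCE B (Python) =====
-- def branch_and_bound_heuristic(graph, start, goal, heuristic):
--     frontier = [(heuristic[start], [start])]
--     while frontier:
--         best = min(frontier)
--         frontier.remove(best)
--         cost, path = best
--         node = path[-1]
--         if node == goal:
--             return path
--         for nb in graph.get(node, []):
--             if nb not in path:
--                 frontier.append((cost + heuristic.get(nb, 0), path + [nb]))
--     return None
-- ===== Notes on version B (the rewrite author's own statement) =====
-- stated objective: simpler
-- what changed: Replaces the heapq binary heap that drives the best-first frontier by a plain list from which each iteration extracts the minimum (cost, path) entry with a linear min-scan (min + remove), keeping the same goal check and neighbour expansion; pop order and returned value are identical.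
import Mathlib
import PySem

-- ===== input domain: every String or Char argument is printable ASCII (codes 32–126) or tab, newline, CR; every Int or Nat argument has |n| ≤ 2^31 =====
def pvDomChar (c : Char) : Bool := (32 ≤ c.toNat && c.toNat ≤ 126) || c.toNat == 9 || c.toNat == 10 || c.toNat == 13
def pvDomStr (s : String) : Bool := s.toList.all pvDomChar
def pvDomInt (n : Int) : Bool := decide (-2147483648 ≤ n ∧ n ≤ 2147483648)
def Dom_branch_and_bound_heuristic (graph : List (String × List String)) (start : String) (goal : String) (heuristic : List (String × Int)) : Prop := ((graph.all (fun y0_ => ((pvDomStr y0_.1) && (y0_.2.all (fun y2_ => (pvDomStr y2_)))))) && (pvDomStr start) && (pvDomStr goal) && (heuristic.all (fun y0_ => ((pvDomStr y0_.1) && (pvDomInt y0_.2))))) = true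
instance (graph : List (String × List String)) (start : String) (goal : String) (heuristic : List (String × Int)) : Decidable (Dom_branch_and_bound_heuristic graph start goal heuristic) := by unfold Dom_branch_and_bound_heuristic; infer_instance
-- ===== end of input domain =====

-- B replaces the heapq binary heap driving the best-first frontier by a plain list popped with a
-- linear min-scan (objective: simpler); pop order and returned value are identical.

-- ===== PORT A =====
-- Python compares the heap entries (cost, path) with '<' on tuples: lexicographic, where the
-- paths (lists of strings) are themselves compared lexicographically.  PySem has no lexicographic
-- order on pairs/lists, so the comparison is ported by hand; it is exact on the ASCII domain
-- (both Python and Lean compare strings by code point, shorter prefix first).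
def pvPathLt : List String → List String → Bool
  | _, [] => false
  | [], _ :: _ => true
  | a :: as, b :: bs => decide (a < b) || (a == b && pvPathLt as bs)

def pvEntLt (x y : Int × List String) : Bool :=
  decide (x.1 < y.1) || (x.1 == y.1 && pvPathLt x.2 y.2)

def pvHget (l : List (Int × List String)) (i : Nat) : Int × List String := l.getD i (0, [])

-- CPython heapq._siftdown, transliterated (the held newitem is passed along; each loop step
-- writes the parent into the hole and moves the hole up).
def pvSiftdownGo (h : List (Int × List String)) (newitem : Int × List String)
    (startpos pos : Nat) : List (Int × List String) :=
  -- parentpos = (pos - 1) >> 1, parent = heap[parentpos], inlined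
  if startpos < pos then
    if pvEntLt newitem (pvHget h ((pos - 1) / 2)) then
      pvSiftdownGo (h.set pos (pvHget h ((pos - 1) / 2))) newitem startpos ((pos - 1) / 2)
    else h.set pos newitem
  else h.set pos newitem
  termination_by pos
  decreasing_by omega

-- CPython heapq.heappush
def pvHeappush (h : List (Int × List String)) (item : Int × List String) : List (Int × List String) :=
  pvSiftdownGo (h ++ [item]) item 0 h.length

-- the child chosen by CPython's _siftup: the right child if it is in range and not greater
-- than the left one, else the left child (childpos = 2*pos+1, rightpos = childpos+1, inlined)
def pvChild (h : List (Int × List String)) (endpos pos : Nat) : Nat :=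
  if 2 * pos + 2 < endpos && !pvEntLt (pvHget h (2 * pos + 1)) (pvHget h (2 * pos + 2))
  then 2 * pos + 2 else 2 * pos + 1

theorem pvChild_gt (h : List (Int × List String)) (endpos pos : Nat) :
    pos < pvChild h endpos pos ∧ pvChild h endpos pos ≤ 2 * pos + 2 := by
  unfold pvChild; split <;> omega

-- CPython heapq._siftup's child-moving loop; returns the array and the final hole position.
def pvSiftupGo (h : List (Int × List String)) (endpos pos : Nat) : List (Int × List String) × Nat :=
  if 2 * pos + 1 < endpos then
    pvSiftupGo (h.set pos (pvHget h (pvChild h endpos pos))) endpos (pvChild h endpos pos)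
  else (h, pos)
  termination_by endpos - pos
  decreasing_by
    have := pvChild_gt h endpos pos
    omega

-- CPython heapq._siftup = move-children-up loop, write newitem at the leaf hole, then _siftdown.
def pvSiftup (h : List (Int × List String)) (pos : Nat) : List (Int × List String) :=
  pvSiftdownGo ((pvSiftupGo h h.length pos).1.set (pvSiftupGo h h.length pos).2 (pvHget h pos))
    (pvHget h pos) pos (pvSiftupGo h h.length pos).2

-- CPython heapq.heappop; none = pop from an empty list (IndexError, unreachable here).
def pvHeappop (h : List (Int × List String)) :
    Option ((Int × List String) × List (Int × List String)) :=
  match h.getLast? with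
  | none => none
  | some lastelt =>
    if h.dropLast.isEmpty then some (lastelt, [])
    else some (pvHget h.dropLast 0, pvSiftup (h.dropLast.set 0 lastelt) 0)

-- The while loop, fueled (the Python loop always terminates: entries carry simple paths, so the
-- number of pops is bounded by the number of simple paths, which pvFuel dominates).
def pvLoopA (graph : List (String × List String)) (goal : String)
    (heuristic : List (String × Int)) : Nat → List (Int × List String) → Option (List String)
  | 0, _ => none
  | fuel + 1, pq =>
    match pvHeappop pq with
    | none => none
    | some (e, pq') =>
      match PySem.List.pyGet? e.2 (-1) with
      | none => none  -- current_path[-1] on an empty path: unreachable (paths are nonempty)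
      | some current =>
        if current == goal then some e.2
        else
          pvLoopA graph goal heuristic fuel
            (((PySem.Dict.mk graph).getD current []).foldl
              (fun acc nb =>
                if nb ∈ e.2 then acc
                else pvHeappush acc (e.1 + (PySem.Dict.mk heuristic).getD nb 0, e.2 ++ [nb]))
              pq')

-- fuel bound: with m = 2 + total number of neighbour entries, every frontier entry holds a simple
-- path over at most m-1 nodes, so m^m dominates the number of loop iterations.
def pvFuel (graph : List (String × List String)) : Nat :=
  ((graph.map (fun p => p.2.length)).sum + 2) ^ ((graph.map (fun p => p.2.length)).sum + 2)

def branch_and_bound_heuristic (graph : List (String × List String)) (start : String)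
    (goal : String) (heuristic : List (String × Int)) : Option (List String) :=
  match (PySem.Dict.mk heuristic).get? start with
  | none => none  -- heuristic[start]: KeyError, excluded by Pre_
  | some h0 => pvLoopA graph goal heuristic (pvFuel graph) [(h0, [start])]

-- ===== PORT B =====
-- min(frontier): Python's builtin min with tuple comparison (first minimal element); ported by
-- hand as the running-minimum fold since PySem.List.min? does not know Python's tuple order.
def pvMinScan (x : Int × List String) (l : List (Int × List String)) : Int × List String :=
  l.foldl (fun m y => if pvEntLt y m then y else m) x

def pvLoopB (graph : List (String × List String)) (goal : String)
    (heuristic : List (String × Int)) : Nat → List (Int × List String) → Option (List String)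
  | 0, _ => none
  | fuel + 1, frontier =>
    match frontier with
    | [] => none
    | f0 :: fs =>
      let best := pvMinScan f0 fs
      match PySem.List.remove? frontier best with
      | none => none  -- frontier.remove(best): unreachable, best ∈ frontier
      | some frontier' =>
        match PySem.List.pyGet? best.2 (-1) with
        | none => none  -- path[-1] on an empty path: unreachable
        | some node =>
          if node == goal then some best.2
          else
            pvLoopB graph goal heuristic fuel
              (((PySem.Dict.mk graph).getD node []).foldl
                (fun acc nb =>
                  if nb ∈ best.2 then acc
                  else acc ++ [(best.1 + (PySem.Dict.mk heuristic).getD nb 0, best.2 ++ [nb])])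
                frontier')

def branch_and_bound_heuristic_alt (graph : List (String × List String)) (start : String)
    (goal : String) (heuristic : List (String × Int)) : Option (List String) :=
  match (PySem.Dict.mk heuristic).get? start with
  | none => none  -- heuristic[start]: KeyError, excluded by Pre_
  | some h0 => pvLoopB graph goal heuristic (pvFuel graph) [(h0, [start])]

-- ===== PRECONDITION & SPEC =====
-- Pre_ excludes exactly the inputs where `heuristic[start]` raises KeyError in Python.
def Pre_branch_and_bound_heuristic (_graph : List (String × List String)) (start : String)
    (_goal : String) (heuristic : List (String × Int)) : Prop :=
  start ∈ heuristic.map Prod.fst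
instance (graph : List (String × List String)) (start : String) (goal : String) (heuristic : List (String × Int)) : Decidable (Pre_branch_and_bound_heuristic graph start goal heuristic) := by unfold Pre_branch_and_bound_heuristic; infer_instance

def pvWitness_branch_and_bound_heuristic :
    (List (String × List String)) × String × String × (List (String × Int)) :=
  ([("A", ["B", "C"]), ("B", ["C"])], "A", "C", [("A", 3), ("B", 1), ("C", 0)])

def Spec_branch_and_bound_heuristic (graph : List (String × List String)) (start : String) (goal : String) (heuristic : List (String × Int)) (out : Option (List String)) : Prop := out = branch_and_bound_heuristic_alt graph start goal heuristic
instance (graph : List (String × List String)) (start : String) (goal : String) (heuristic : List (String × Int)) (out : Option (List String)) : Decidable (Spec_branch_and_bound_heuristic graph start goal heuristic out) := by unfold Spec_branch_and_bound_heuristic; infer_instance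

-- ===== CLAIM (what is proved, stated in full; the proofs are below) =====
def Claim_equal_branch_and_bound_heuristic : Prop := ∀ (graph : List (String × List String)) (start : String) (goal : String) (heuristic : List (String × Int)), Dom_branch_and_bound_heuristic graph start goal heuristic → Pre_branch_and_bound_heuristic graph start goal heuristic → Spec_branch_and_bound_heuristic graph start goal heuristic (branch_and_bound_heuristic graph start goal heuristic)

-- ===== LEMMAS AND PROOFS =====

-- ----- order lemmas: pvEntLt is a strict linear order (matching Python tuple comparison) -----

theorem pvPathLt_irrefl (a : List String) : pvPathLt a a = false := by
  induction a with
  | nil => rfl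
  | cons x xs ih => simp [pvPathLt, ih]

theorem pvPathLt_trans {a b c : List String} (h1 : pvPathLt a b = true)
    (h2 : pvPathLt b c = true) : pvPathLt a c = true := by
  induction a generalizing b c with
  | nil =>
    cases b with
    | nil => simp [pvPathLt] at h1
    | cons y ys => cases c with
      | nil => simp [pvPathLt] at h2
      | cons z zs => simp [pvPathLt]
  | cons x xs ih =>
    cases b with
    | nil => simp [pvPathLt] at h1
    | cons y ys =>
      cases c with
      | nil => simp [pvPathLt] at h2
      | cons z zs =>
        simp only [pvPathLt, Bool.or_eq_true, Bool.and_eq_true, decide_eq_true_eq,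
          beq_iff_eq] at h1 h2 ⊢
        rcases h1 with h1 | ⟨rfl, h1⟩
        · rcases h2 with h2 | ⟨rfl, h2⟩
          · exact Or.inl (lt_trans h1 h2)
          · exact Or.inl h1
        · rcases h2 with h2 | ⟨rfl, h2⟩
          · exact Or.inl h2
          · exact Or.inr ⟨rfl, ih h1 h2⟩

theorem pvPathLt_conn {a b : List String} (h1 : pvPathLt a b = false)
    (h2 : pvPathLt b a = false) : a = b := by
  induction a generalizing b with
  | nil => cases b with
    | nil => rfl
    | cons y ys => simp [pvPathLt] at h1
  | cons x xs ih =>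
    cases b with
    | nil => simp [pvPathLt] at h2
    | cons y ys =>
      simp only [pvPathLt, Bool.or_eq_false_iff, Bool.and_eq_false_iff,
        decide_eq_false_iff_not, beq_eq_false_iff_ne, ne_eq] at h1 h2
      obtain ⟨hxy, h1'⟩ := h1
      obtain ⟨hyx, h2'⟩ := h2
      have hxyeq : x = y := le_antisymm (not_lt.mp hyx) (not_lt.mp hxy)
      subst hxyeq
      rcases h1' with h1' | h1'
      · exact absurd rfl h1'
      · rcases h2' with h2' | h2'
        · exact absurd rfl h2'
        · exact congrArg (x :: ·) (ih h1' h2')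

theorem pvEntLt_irrefl (a : Int × List String) : pvEntLt a a = false := by
  simp [pvEntLt, pvPathLt_irrefl]

theorem pvEntLt_trans {a b c : Int × List String} (h1 : pvEntLt a b = true)
    (h2 : pvEntLt b c = true) : pvEntLt a c = true := by
  simp only [pvEntLt, Bool.or_eq_true, Bool.and_eq_true, decide_eq_true_eq, beq_iff_eq]
    at h1 h2 ⊢
  rcases h1 with h1 | ⟨e1, h1⟩
  · rcases h2 with h2 | ⟨e2, h2⟩
    · exact Or.inl (lt_trans h1 h2)
    · exact Or.inl (e2 ▸ h1)
  · rcases h2 with h2 | ⟨e2, h2⟩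
    · exact Or.inl (e1 ▸ h2)
    · exact Or.inr ⟨e1.trans e2, pvPathLt_trans h1 h2⟩

theorem pvEntLt_asymm {a b : Int × List String} (h : pvEntLt a b = true) :
    pvEntLt b a = false := by
  by_contra hc
  have hba : pvEntLt b a = true := by
    cases hv : pvEntLt b a
    · exact absurd hv hc
    · rfl
  have := pvEntLt_trans h hba
  rw [pvEntLt_irrefl] at this
  exact absurd this (by simp)

theorem pvEntLt_conn {a b : Int × List String} (h1 : pvEntLt a b = false)
    (h2 : pvEntLt b a = false) : a = b := by
  simp only [pvEntLt, Bool.or_eq_false_iff, Bool.and_eq_false_iff, decide_eq_false_iff_not,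
    beq_eq_false_iff_ne, ne_eq] at h1 h2
  obtain ⟨hab, h1'⟩ := h1
  obtain ⟨hba, h2'⟩ := h2
  have he : a.1 = b.1 := le_antisymm (not_lt.mp hba) (not_lt.mp hab)
  rcases h1' with h1' | h1'
  · exact absurd he h1'
  · rcases h2' with h2' | h2'
    · exact absurd he.symm h2'
    · exact Prod.ext he (pvPathLt_conn h1' h2')

-- transitivity of the associated 'le' (le a b := pvEntLt b a = false)
theorem pvLe_trans {a b c : Int × List String} (h1 : pvEntLt b a = false)
    (h2 : pvEntLt c b = false) : pvEntLt c a = false := by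
  cases hv : pvEntLt c a
  · rfl
  · rcases hw : pvEntLt b c with _ | _
    · have := pvEntLt_conn h2 hw
      subst this
      simp_all
    · have := pvEntLt_trans hw hv
      simp_all

-- lt on the left of le: pvEntLt a b, le b c → lt-free: pvEntLt c a = false
theorem pvLtLe_trans {a b c : Int × List String} (h1 : pvEntLt a b = true)
    (h2 : pvEntLt c b = false) : pvEntLt c a = false := by
  cases hv : pvEntLt c a
  · rfl
  · have := pvEntLt_trans hv h1
    simp_all

theorem pvLtLe_trans' {a b c : Int × List String} (h1 : pvEntLt a b = true)
    (h2 : pvEntLt a c = false) : pvEntLt b c = false := by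
  cases hv : pvEntLt b c
  · rfl
  · have := pvEntLt_trans h1 hv
    simp_all

-- ----- indexing helpers -----

theorem pvHget_eq_getElem (h : List (Int × List String)) (i : Nat) (hi : i < h.length) :
    pvHget h i = h[i] := by
  simp [pvHget, List.getD_eq_getElem?_getD, List.getElem?_eq_getElem hi]

theorem pvHget_set_self (h : List (Int × List String)) (i : Nat) (hi : i < h.length)
    (x : Int × List String) : pvHget (h.set i x) i = x := by
  rw [pvHget_eq_getElem _ _ (by simpa using hi)]
  simp [List.getElem_set_self]

theorem pvHget_set_ne (h : List (Int × List String)) (i j : Nat) (hne : j ≠ i)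
    (x : Int × List String) : pvHget (h.set i x) j = pvHget h j := by
  simp [pvHget, List.getD_eq_getElem?_getD, List.getElem?_set_ne (Ne.symm hne)]

theorem pvHget_mem (h : List (Int × List String)) (i : Nat) (hi : i < h.length) :
    pvHget h i ∈ h := by
  rw [pvHget_eq_getElem h i hi]; exact List.getElem_mem hi

theorem mem_hget (h : List (Int × List String)) {x : Int × List String} (hx : x ∈ h) :
    ∃ i, i < h.length ∧ pvHget h i = x := by
  obtain ⟨i, hi, rfl⟩ := List.mem_iff_getElem.mp hx
  exact ⟨i, hi, pvHget_eq_getElem h i hi⟩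

-- swapping two writes: (h.set i h[j]).set j x is a permutation of h.set i x
theorem pvSet_set_perm (h : List (Int × List String)) (i j : Nat) (hi : i < h.length)
    (hj : j < h.length) (x : Int × List String) :
    List.Perm ((h.set i (pvHget h j)).set j x) (h.set i x) := by
  induction h generalizing i j with
  | nil => simp at hi
  | cons a t ih =>
    cases i with
    | zero =>
      cases j with
      | zero => simp [pvHget]
      | succ k =>
        have hk : k < t.length := by simpa using hj
        have hg : pvHget (a :: t) (k + 1) = t[k] := by
          rw [pvHget_eq_getElem _ _ (by simpa using hj)]; simp
        rw [hg]
        simp only [List.set_cons_zero, List.set_cons_succ]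
        have h1 := List.set_perm_cons_eraseIdx hk x
        have h2 := (List.getElem_cons_eraseIdx_perm hk).symm
        exact ((h1.cons t[k]).trans (List.Perm.swap x t[k] _)).trans (h2.symm.cons x)
    | succ k =>
      cases j with
      | zero =>
        have hk : k < t.length := by simpa using hi
        have hg : pvHget (a :: t) 0 = a := by rw [pvHget_eq_getElem _ _ (by simp)]; simp
        rw [hg]
        simp only [List.set_cons_succ, List.set_cons_zero]
        have h1 := List.set_perm_cons_eraseIdx hk a
        have h2 := (List.set_perm_cons_eraseIdx hk x).symm
        exact ((h1.cons x).trans (List.Perm.swap a x _)).trans (h2.cons a)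
      | succ m =>
        have hk : k < t.length := by simpa using hi
        have hm : m < t.length := by simpa using hj
        have hg : pvHget (a :: t) (m + 1) = pvHget t m := by
          rw [pvHget_eq_getElem _ _ (by simpa using hj), pvHget_eq_getElem _ _ hm]; simp
        rw [hg]
        simp only [List.set_cons_succ]
        exact (ih k m hk hm).cons a

-- ----- permutation lemmas for the heap primitives -----

theorem pvSiftdownGo_perm (ni : Int × List String) (s : Nat) :
    ∀ pos h, pos < List.length h →
      List.Perm (pvSiftdownGo h ni s pos) (h.set pos ni) := by
  intro pos
  induction pos using Nat.strong_induction_on with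
  | _ pos IH =>
    intro h hl
    rw [pvSiftdownGo]
    split
    · split
      · have hpp : (pos - 1) / 2 < pos := by omega
        have := IH _ hpp (h.set pos (pvHget h ((pos - 1) / 2))) (by simp; omega)
        exact this.trans (pvSet_set_perm h pos ((pos - 1) / 2) hl (by omega) ni)
      · exact List.Perm.refl _
    · exact List.Perm.refl _

theorem pvHeappush_perm (h : List (Int × List String)) (x : Int × List String) :
    List.Perm (pvHeappush h x) (x :: h) := by
  unfold pvHeappush
  have hl : h.length < (h ++ [x]).length := by simp
  have := pvSiftdownGo_perm x 0 h.length (h ++ [x]) hl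
  have hset : (h ++ [x]).set h.length x = h ++ [x] := by
    rw [List.set_append_right _ _ (le_refl _)]
    simp
  rw [hset] at this
  exact this.trans (List.perm_append_singleton x h)

theorem pvChild_lt (h : List (Int × List String)) {endpos pos : Nat}
    (hc : 2 * pos + 1 < endpos) : pvChild h endpos pos < endpos := by
  unfold pvChild; split
  · next hcond => simp only [Bool.and_eq_true, decide_eq_true_eq] at hcond; omega
  · omega

theorem pvChild_cases (h : List (Int × List String)) (endpos pos : Nat) :
    pvChild h endpos pos = 2 * pos + 1 ∨ pvChild h endpos pos = 2 * pos + 2 := by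
  unfold pvChild; split <;> omega

-- the chosen child is the smaller of the (in-range) children
theorem pvChild_min (h : List (Int × List String)) {endpos pos : Nat}
    (_hc : 2 * pos + 1 < endpos) :
    ∀ j, (j = 2 * pos + 1 ∨ j = 2 * pos + 2) → j < endpos →
      pvEntLt (pvHget h j) (pvHget h (pvChild h endpos pos)) = false := by
  intro j hj hjlt
  unfold pvChild
  split
  · next hcond =>
    simp only [Bool.and_eq_true, Bool.not_eq_eq_eq_not, Bool.not_true,
      decide_eq_true_eq] at hcond
    rcases hj with rfl | rfl
    · exact hcond.2
    · exact pvEntLt_irrefl _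
  · next hcond =>
    rcases hj with rfl | rfl
    · exact pvEntLt_irrefl _
    · simp only [Bool.and_eq_true, decide_eq_true_eq, Bool.not_eq_true', not_and] at hcond
      exact pvEntLt_asymm (Bool.ne_false_iff.mp (hcond hjlt))

theorem pvSiftupGo_spec :
    ∀ (d endpos pos : Nat) (h : List (Int × List String)), endpos - pos = d →
      pos < List.length h → endpos = List.length h →
      (pvSiftupGo h endpos pos).1.length = h.length ∧
      (pvSiftupGo h endpos pos).2 < h.length ∧
      (∀ x, List.Perm ((pvSiftupGo h endpos pos).1.set (pvSiftupGo h endpos pos).2 x)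
        (h.set pos x)) ∧
      endpos ≤ 2 * (pvSiftupGo h endpos pos).2 + 1 := by
  intro d
  induction d using Nat.strong_induction_on with
  | _ d IH =>
    intro endpos pos h hd hpos hend
    rw [pvSiftupGo]
    split
    · next hlt =>
      have hcc := pvChild_gt h endpos pos
      have hclt := pvChild_lt h hlt
      have hlen : pos < (h.set pos (pvHget h (pvChild h endpos pos))).length := by
        simpa using hpos
      have hc_len : pvChild h endpos pos < (h.set pos (pvHget h (pvChild h endpos pos))).length := by
        simp only [List.length_set]; omega
      obtain ⟨L, F, P, E⟩ := IH (endpos - pvChild h endpos pos) (by omega) endpos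
        (pvChild h endpos pos) (h.set pos (pvHget h (pvChild h endpos pos))) rfl hc_len
        (by simpa using hend)
      refine ⟨by simpa using L, by simpa using F, fun x => ?_, E⟩
      exact (P x).trans (pvSet_set_perm h pos (pvChild h endpos pos) hpos (by omega) x)
    · next hlt =>
      exact ⟨rfl, hpos, fun x => List.Perm.refl _, by omega⟩

theorem pvSiftup_perm (h : List (Int × List String)) (hl : 0 < h.length) :
    List.Perm (pvSiftup h 0) h := by
  unfold pvSiftup
  obtain ⟨L, F, P, E⟩ := pvSiftupGo_spec _ h.length 0 h rfl hl rfl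
  have h1 := pvSiftdownGo_perm (pvHget h 0) 0 (pvSiftupGo h h.length 0).2
    (((pvSiftupGo h h.length 0).1.set (pvSiftupGo h h.length 0).2 (pvHget h 0)))
    (by simp only [List.length_set]; omega)
  rw [List.set_set] at h1
  refine h1.trans ((P (pvHget h 0)).trans ?_)
  rw [pvHget_eq_getElem h 0 hl, List.set_getElem_self]

theorem pvHeappop_none (h : List (Int × List String)) : pvHeappop h = none ↔ h = [] := by
  unfold pvHeappop
  cases h with
  | nil => simp
  | cons a t =>
    rw [List.getLast?_eq_some_getLast (by simp)]
    split <;> simp_all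
    split <;> simp

theorem pvHeappop_some {h : List (Int × List String)} {r : Int × List String}
    {h' : List (Int × List String)} (he : pvHeappop h = some (r, h')) :
    r = pvHget h 0 ∧ List.Perm (r :: h') h := by
  have hne : h ≠ [] := by
    intro hnil; subst hnil; simp [pvHeappop] at he
  unfold pvHeappop at he
  rw [List.getLast?_eq_some_getLast hne] at he
  dsimp only at he
  have hsplit : h.dropLast ++ [h.getLast hne] = h := List.dropLast_concat_getLast hne
  by_cases hrest : h.dropLast = []
  · rw [if_pos (by simpa [List.isEmpty_iff] using hrest)] at he
    simp only [Option.some.injEq, Prod.mk.injEq] at he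
    obtain ⟨rfl, rfl⟩ := he
    rcases h with _ | ⟨a, t⟩
    · exact absurd rfl hne
    rcases t with _ | ⟨b, t⟩
    · exact ⟨by simp [pvHget], by simp⟩
    · simp at hrest
  · rw [if_neg (by simpa [List.isEmpty_iff] using hrest)] at he
    simp only [Option.some.injEq, Prod.mk.injEq] at he
    obtain ⟨rfl, rfl⟩ := he
    have hdl : 0 < h.dropLast.length := List.length_pos_iff.mpr hrest
    constructor
    · rw [pvHget_eq_getElem _ _ hdl, pvHget_eq_getElem _ _ (List.length_pos_iff.mpr hne),
        List.getElem_dropLast]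
    · have hsp := pvSiftup_perm (h.dropLast.set 0 (h.getLast hne)) (by simpa using hdl)
      have h1 := List.set_perm_cons_eraseIdx hdl (h.getLast hne)
      have h2 := List.getElem_cons_eraseIdx_perm hdl
      rw [pvHget_eq_getElem _ _ hdl]
      refine (List.Perm.cons _ hsp).trans ?_
      refine (List.Perm.cons _ h1).trans ?_
      refine (List.Perm.swap _ _ _).trans ?_
      refine (List.Perm.cons _ h2).trans ?_
      exact (List.perm_append_singleton _ _).symm.trans (List.Perm.of_eq hsplit)

-- ----- the heap invariant -----

def PvHeapInv (h : List (Int × List String)) : Prop :=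
  ∀ i j : Nat, j < h.length → (j = 2 * i + 1 ∨ j = 2 * i + 2) →
    pvEntLt (pvHget h j) (pvHget h i) = false

theorem pvRoot_min {h : List (Int × List String)} (hinv : PvHeapInv h) :
    ∀ x ∈ h, pvEntLt x (pvHget h 0) = false := by
  have key : ∀ i, i < h.length → pvEntLt (pvHget h i) (pvHget h 0) = false := by
    intro i
    induction i using Nat.strong_induction_on with
    | _ i IH =>
      intro hi
      cases i with
      | zero => exact pvEntLt_irrefl _
      | succ k =>
        have hchild : k + 1 = 2 * (k / 2) + 1 ∨ k + 1 = 2 * (k / 2) + 2 := by omega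
        have h1 := hinv (k / 2) (k + 1) hi hchild
        have h2 := IH (k / 2) (by omega) (by omega)
        exact pvLe_trans h2 h1
  intro x hx
  obtain ⟨i, hi, rfl⟩ := mem_hget h hx
  exact key i hi

-- bubble-up precondition: h with newitem conceptually at the hole pos is a heap except the
-- edge into pos; children of pos dominate newitem and (when pos ≠ 0) the hole's parent.
def PvInvUp (h : List (Int × List String)) (ni : Int × List String) (pos : Nat) : Prop :=
  (∀ i j : Nat, j < h.length → (j = 2 * i + 1 ∨ j = 2 * i + 2) → i ≠ pos → j ≠ pos →
    pvEntLt (pvHget h j) (pvHget h i) = false) ∧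
  (∀ j : Nat, j < h.length → (j = 2 * pos + 1 ∨ j = 2 * pos + 2) →
    pvEntLt (pvHget h j) ni = false) ∧
  (0 < pos → ∀ j : Nat, j < h.length → (j = 2 * pos + 1 ∨ j = 2 * pos + 2) →
    pvEntLt (pvHget h j) (pvHget h ((pos - 1) / 2)) = false)

theorem pvSiftdownGo_inv (ni : Int × List String) :
    ∀ pos h, pos < List.length h → PvInvUp h ni pos →
      PvHeapInv (pvSiftdownGo h ni 0 pos) := by
  intro pos
  induction pos using Nat.strong_induction_on with
  | _ pos IH =>
    intro h hl hinv
    obtain ⟨I1, I2, I3⟩ := hinv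
    rw [pvSiftdownGo]
    rcases Nat.eq_zero_or_pos pos with hp0 | h0
    · subst hp0
      rw [if_neg (by omega)]
      intro i j hj hc
      have hj' : j < h.length := by simpa using hj
      have hjne : j ≠ 0 := by omega
      rw [pvHget_set_ne h 0 j hjne ni]
      by_cases hi0 : i = 0
      · subst hi0
        rw [pvHget_set_self h 0 hl ni]
        exact I2 j hj' hc
      · rw [pvHget_set_ne h 0 i hi0 ni]
        exact I1 i j hj' hc hi0 hjne
    · rw [if_pos h0]
      have hplt : (pos - 1) / 2 < pos := by omega
      split
      · next hbr =>
        apply IH ((pos - 1) / 2) hplt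
        · simp only [List.length_set]; omega
        · refine ⟨?_, ?_, ?_⟩
          · intro i j hj hc hip hjp
            have hj' : j < h.length := by simpa using hj
            by_cases hipos : pos = i
            · subst hipos
              have hjpos : j ≠ pos := by rcases hc with hc | hc <;> omega
              rw [pvHget_set_ne h pos j hjpos, pvHget_set_self h pos hl]
              exact I3 h0 j hj' hc
            · by_cases hjpos : pos = j
              · exfalso; apply hip; subst hjpos; rcases hc with hc | hc <;> omega
              · rw [pvHget_set_ne h pos j (Ne.symm hjpos),
                  pvHget_set_ne h pos i (Ne.symm hipos)]
                exact I1 i j hj' hc (Ne.symm hipos) (Ne.symm hjpos)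
          · intro j hj hc
            have hj' : j < h.length := by simpa using hj
            by_cases hjpos : pos = j
            · subst hjpos
              rw [pvHget_set_self h pos hl]
              exact pvEntLt_asymm hbr
            · rw [pvHget_set_ne h pos j (Ne.symm hjpos)]
              exact pvLtLe_trans hbr (I1 ((pos - 1) / 2) j hj' hc (by omega) (Ne.symm hjpos))
          · intro hq0 j hj hc
            have hj' : j < h.length := by simpa using hj
            have hgp : ((pos - 1) / 2 - 1) / 2 ≠ pos := by omega
            rw [pvHget_set_ne h pos (((pos - 1) / 2 - 1) / 2) hgp]
            have hplen : (pos - 1) / 2 < h.length := by omega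
            have hpchild : (pos - 1) / 2 = 2 * (((pos - 1) / 2 - 1) / 2) + 1 ∨
                (pos - 1) / 2 = 2 * (((pos - 1) / 2 - 1) / 2) + 2 := by omega
            have hgpedge := I1 (((pos - 1) / 2 - 1) / 2) ((pos - 1) / 2) hplen hpchild
              (by omega) (by omega)
            by_cases hjpos : pos = j
            · subst hjpos
              rw [pvHget_set_self h pos hl]
              exact hgpedge
            · rw [pvHget_set_ne h pos j (Ne.symm hjpos)]
              exact pvLe_trans hgpedge (I1 ((pos - 1) / 2) j hj' hc (by omega) (Ne.symm hjpos))
      · next hbr =>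
        intro i j hj hc
        have hj' : j < h.length := by simpa using hj
        by_cases hjpos : pos = j
        · subst hjpos
          have hieq : i = (pos - 1) / 2 := by rcases hc with hc | hc <;> omega
          rw [pvHget_set_self h pos hl, pvHget_set_ne h pos i (by omega), hieq]
          simpa using hbr
        · rw [pvHget_set_ne h pos j (Ne.symm hjpos)]
          by_cases hipos : pos = i
          · subst hipos
            rw [pvHget_set_self h pos hl]
            exact I2 j hj' hc
          · rw [pvHget_set_ne h pos i (Ne.symm hipos)]
            exact I1 i j hj' hc (Ne.symm hipos) (Ne.symm hjpos)

theorem pvHget_append (h : List (Int × List String)) (x : Int × List String) {k : Nat}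
    (hk : k < h.length) : pvHget (h ++ [x]) k = pvHget h k := by
  rw [pvHget_eq_getElem _ _ (by simp; omega), pvHget_eq_getElem _ _ hk,
    List.getElem_append_left hk]

theorem pvHeappush_inv {h : List (Int × List String)} (hinv : PvHeapInv h)
    (x : Int × List String) : PvHeapInv (pvHeappush h x) := by
  unfold pvHeappush
  apply pvSiftdownGo_inv x h.length (h ++ [x]) (by simp)
  refine ⟨?_, ?_, ?_⟩
  · intro i j hj hc hil hjl
    have hj' : j < h.length := by simp at hj; omega
    have hi' : i < h.length := by rcases hc with hc | hc <;> omega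
    rw [pvHget_append h x hj', pvHget_append h x hi']
    exact hinv i j hj' hc
  · intro j hj hc
    simp at hj
    omega
  · intro h0 j hj hc
    simp at hj
    omega

-- move-smaller-child-up precondition: heap except edges incident to the hole pos; the hole's
-- parent (when pos ≠ 0) dominates the hole's children.
def PvInvDown (h : List (Int × List String)) (pos : Nat) : Prop :=
  (∀ i j : Nat, j < h.length → (j = 2 * i + 1 ∨ j = 2 * i + 2) → i ≠ pos → j ≠ pos →
    pvEntLt (pvHget h j) (pvHget h i) = false) ∧
  (0 < pos → ∀ j : Nat, j < h.length → (j = 2 * pos + 1 ∨ j = 2 * pos + 2) →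
    pvEntLt (pvHget h j) (pvHget h ((pos - 1) / 2)) = false)

theorem pvSiftupGo_inv :
    ∀ (d endpos pos : Nat) (h : List (Int × List String)), endpos - pos = d →
      pos < List.length h → endpos = List.length h → PvInvDown h pos →
      PvInvDown (pvSiftupGo h endpos pos).1 (pvSiftupGo h endpos pos).2 := by
  intro d
  induction d using Nat.strong_induction_on with
  | _ d IH =>
    intro endpos pos h hd hpos hend hinv
    obtain ⟨I1, I2⟩ := hinv
    rw [pvSiftupGo]
    split
    · next hlt =>
      have hcc := pvChild_gt h endpos pos
      have hclt := pvChild_lt h hlt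
      have hccases := pvChild_cases h endpos pos
      have hcmin := pvChild_min h hlt
      have hclen : pvChild h endpos pos < h.length := by omega
      apply IH (endpos - pvChild h endpos pos) (by omega) endpos (pvChild h endpos pos)
        _ rfl (by simpa using hclen) (by simpa using hend)
      constructor
      · intro i j hj hc hic hjc
        have hj' : j < h.length := by simpa using hj
        by_cases hipos : pos = i
        · subst hipos
          have hjpos : j ≠ pos := by rcases hc with hc | hc <;> omega
          rw [pvHget_set_ne h pos j hjpos, pvHget_set_self h pos hpos]
          exact hcmin j (by rcases hccases with hcc' | hcc' <;> rcases hc with hc | hc <;> omega)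
            (by omega)
        · by_cases hjpos : pos = j
          · -- i is the parent of pos
            subst hjpos
            have h0 : 0 < pos := by rcases hc with hc | hc <;> omega
            have hieq : i = (pos - 1) / 2 := by rcases hc with hc | hc <;> omega
            rw [pvHget_set_self h pos hpos, pvHget_set_ne h pos i (Ne.symm hipos), hieq]
            exact I2 h0 (pvChild h endpos pos) hclen (by omega)
          · rw [pvHget_set_ne h pos j (Ne.symm hjpos), pvHget_set_ne h pos i (Ne.symm hipos)]
            exact I1 i j hj' hc (Ne.symm hipos) (Ne.symm hjpos)
      · intro hc0 j hj hc
        have hj' : j < h.length := by simpa using hj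
        have hparent : (pvChild h endpos pos - 1) / 2 = pos := by
          rcases hccases with hcc' | hcc' <;> omega
        rw [hparent]
        have hjpos : j ≠ pos := by rcases hc with hc | hc <;> omega
        rw [pvHget_set_ne h pos j hjpos, pvHget_set_self h pos hpos]
        exact I1 (pvChild h endpos pos) j hj' hc (by omega) hjpos
    · exact ⟨I1, I2⟩

theorem pvSiftup_inv {h : List (Int × List String)} (hl : 0 < h.length)
    (hinv : PvInvDown h 0) : PvHeapInv (pvSiftup h 0) := by
  unfold pvSiftup
  obtain ⟨L, F, P, E⟩ := pvSiftupGo_spec _ h.length 0 h rfl hl rfl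
  obtain ⟨J1, J2⟩ := pvSiftupGo_inv _ h.length 0 h rfl hl rfl hinv
  apply pvSiftdownGo_inv (pvHget h 0) (pvSiftupGo h h.length 0).2
    ((pvSiftupGo h h.length 0).1.set (pvSiftupGo h h.length 0).2 (pvHget h 0))
    (by simp only [List.length_set]; omega)
  refine ⟨?_, ?_, ?_⟩
  · intro i j hj hc hif hjf
    have hj' : j < (pvSiftupGo h h.length 0).1.length := by simpa using hj
    rw [pvHget_set_ne _ _ j hjf, pvHget_set_ne _ _ i hif]
    exact J1 i j hj' hc hif hjf
  · intro j hj hc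
    simp only [List.length_set] at hj
    omega
  · intro h0 j hj hc
    simp only [List.length_set] at hj
    omega

theorem pvDropLast_inv {h : List (Int × List String)} (hinv : PvHeapInv h) :
    PvHeapInv h.dropLast := by
  intro i j hj hc
  have hj' : j < h.length := by simp at hj; omega
  have hi' : i < h.length := by rcases hc with hc | hc <;> simp at hj <;> omega
  have hji : j < h.dropLast.length := hj
  have hii : i < h.dropLast.length := by rcases hc with hc | hc <;> omega
  rw [pvHget_eq_getElem _ _ hji, pvHget_eq_getElem _ _ hii, List.getElem_dropLast,
    List.getElem_dropLast, ← pvHget_eq_getElem _ _ hj', ← pvHget_eq_getElem _ _ hi']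
  exact hinv i j hj' hc

theorem pvHeappop_inv {h : List (Int × List String)} (hinv : PvHeapInv h)
    {r : Int × List String} {h' : List (Int × List String)}
    (he : pvHeappop h = some (r, h')) : PvHeapInv h' := by
  have hne : h ≠ [] := by
    intro hnil; subst hnil; simp [pvHeappop] at he
  unfold pvHeappop at he
  rw [List.getLast?_eq_some_getLast hne] at he
  dsimp only at he
  by_cases hrest : h.dropLast = []
  · rw [if_pos (by simpa [List.isEmpty_iff] using hrest)] at he
    simp only [Option.some.injEq, Prod.mk.injEq] at he
    obtain ⟨rfl, rfl⟩ := he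
    intro i j hj hc
    simp at hj
  · rw [if_neg (by simpa [List.isEmpty_iff] using hrest)] at he
    simp only [Option.some.injEq, Prod.mk.injEq] at he
    obtain ⟨rfl, rfl⟩ := he
    have hdl : 0 < h.dropLast.length := List.length_pos_iff.mpr hrest
    apply pvSiftup_inv (by simpa using hdl)
    have hdinv := pvDropLast_inv hinv
    constructor
    · intro i j hj hc hi0 hj0
      have hj' : j < h.dropLast.length := by simpa using hj
      rw [pvHget_set_ne _ _ j hj0, pvHget_set_ne _ _ i hi0]
      exact hdinv i j hj' hc
    · intro h0 j hj hc
      omega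

-- ----- min-scan lemmas -----

theorem pvMinScan_mem (x : Int × List String) (l : List (Int × List String)) :
    pvMinScan x l ∈ x :: l := by
  induction l generalizing x with
  | nil => simp [pvMinScan]
  | cons y ys ih =>
    simp only [pvMinScan, List.foldl_cons]
    rcases List.mem_cons.mp (ih (if pvEntLt y x then y else x)) with hm | hm
    · simp only [pvMinScan] at hm
      rw [hm]; split <;> simp
    · simp only [pvMinScan] at hm
      simp [List.mem_cons, hm]

theorem pvMinScan_min (x : Int × List String) (l : List (Int × List String)) :
    ∀ y ∈ x :: l, pvEntLt y (pvMinScan x l) = false := by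
  induction l generalizing x with
  | nil =>
    intro y hy
    rcases List.mem_singleton.mp hy with rfl
    exact pvEntLt_irrefl _
  | cons z zs ih =>
    intro y hy
    have hms : pvMinScan x (z :: zs) = pvMinScan (if pvEntLt z x then z else x) zs := rfl
    rw [hms]
    have hk := ih (if pvEntLt z x then z else x)
    rcases List.mem_cons.mp hy with rfl | hy'
    · -- y = x
      by_cases hzx : pvEntLt z y = true
      · rw [if_pos hzx] at hk ⊢
        exact pvLtLe_trans' hzx (hk z (List.mem_cons_self ..))
      · rw [if_neg hzx] at hk ⊢
        exact hk y (List.mem_cons_self ..)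
    · rcases List.mem_cons.mp hy' with rfl | hy''
      · -- y = z
        by_cases hzx : pvEntLt y x = true
        · rw [if_pos hzx] at hk ⊢
          exact hk y (List.mem_cons_self ..)
        · rw [if_neg hzx] at hk ⊢
          exact pvLe_trans (hk x (List.mem_cons_self ..)) (Bool.not_eq_true _ ▸ hzx)
      · by_cases hzx : pvEntLt z x = true
        · rw [if_pos hzx] at hk ⊢
          exact hk y (List.mem_cons_of_mem _ hy'')
        · rw [if_neg hzx] at hk ⊢
          exact hk y (List.mem_cons_of_mem _ hy'')

-- ----- the neighbour-expansion fold -----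

theorem pvFold_push_append (c : String → Prop) [DecidablePred c]
    (val : String → Int × List String) :
    ∀ (ns : List String) (accA accB : List (Int × List String)),
      PvHeapInv accA → List.Perm accA accB →
      PvHeapInv (ns.foldl (fun a nb => if c nb then a else pvHeappush a (val nb)) accA) ∧
      List.Perm (ns.foldl (fun a nb => if c nb then a else pvHeappush a (val nb)) accA)
        (ns.foldl (fun b nb => if c nb then b else b ++ [val nb]) accB) := by
  intro ns
  induction ns with
  | nil => intro accA accB h1 h2; exact ⟨h1, h2⟩
  | cons n ns ih =>
    intro accA accB h1 h2
    simp only [List.foldl_cons]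
    by_cases hc : c n
    · simp only [if_pos hc]; exact ih accA accB h1 h2
    · simp only [if_neg hc]
      refine ih _ _ (pvHeappush_inv h1 (val n)) ?_
      exact (pvHeappush_perm accA (val n)).trans
        ((h2.cons (val n)).trans (List.perm_append_singleton (val n) accB).symm)

-- ----- the main loop equivalence -----

theorem pvLoop_eq (graph : List (String × List String)) (goal : String)
    (heuristic : List (String × Int)) :
    ∀ (fuel : Nat) (pqA pqB : List (Int × List String)), PvHeapInv pqA → List.Perm pqA pqB →
      pvLoopA graph goal heuristic fuel pqA = pvLoopB graph goal heuristic fuel pqB := by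
  intro fuel
  induction fuel with
  | zero => intro pqA pqB _ _; rfl
  | succ fuel IH =>
    intro pqA pqB hinv hperm
    cases pqB with
    | nil =>
      have : pqA = [] := hperm.eq_nil
      subst this
      rfl
    | cons f0 fs =>
      have hAne : pqA ≠ [] := by
        intro hnil; subst hnil; exact absurd hperm.symm.eq_nil (by simp)
      cases hp : pvHeappop pqA with
      | none => exact absurd ((pvHeappop_none pqA).mp hp) hAne
      | some rp =>
        obtain ⟨r, pq'⟩ := rp
        obtain ⟨hr0, hrperm⟩ := pvHeappop_some hp
        have hinv' : PvHeapInv pq' := pvHeappop_inv hinv hp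
        -- the heap pop and the min-scan return the same entry
        have hbB : pvMinScan f0 fs ∈ f0 :: fs := pvMinScan_mem f0 fs
        have hbA : pvMinScan f0 fs ∈ pqA := hperm.mem_iff.mpr hbB
        have hrA : r ∈ pqA := by
          rw [hr0]
          exact pvHget_mem pqA 0 (List.length_pos_iff.mpr hAne)
        have hrB : r ∈ f0 :: fs := hperm.mem_iff.mp hrA
        have h1 : pvEntLt (pvMinScan f0 fs) r = false := by
          rw [hr0]; exact pvRoot_min hinv _ hbA
        have h2 : pvEntLt r (pvMinScan f0 fs) = false := pvMinScan_min f0 fs r hrB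
        have hrb : r = pvMinScan f0 fs := pvEntLt_conn h2 h1
        -- the removed frontiers are permutations
        have hperm' : List.Perm pq' ((f0 :: fs).erase r) :=
          (List.cons_perm_iff_perm_erase.mp (hrperm.trans hperm)).2
        -- evaluate both loop bodies
        show (match pvHeappop pqA with
          | none => none
          | some (e, pq') =>
            match PySem.List.pyGet? e.2 (-1) with
            | none => none
            | some current =>
              if current == goal then some e.2
              else
                pvLoopA graph goal heuristic fuel
                  (((PySem.Dict.mk graph).getD current []).foldl
                    (fun acc nb =>
                      if nb ∈ e.2 then acc
                      else pvHeappush acc (e.1 + (PySem.Dict.mk heuristic).getD nb 0, e.2 ++ [nb]))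
                    pq')) = _
        rw [hp]
        conv_rhs => rw [pvLoopB]
        dsimp only
        rw [PySem.List.remove?_eq_some_erase (f0 :: fs) (pvMinScan f0 fs) hbB]
        dsimp only
        rw [← hrb]
        cases hg : PySem.List.pyGet? r.2 (-1) with
        | none => rfl
        | some current =>
          dsimp only
          by_cases hgoal : (current == goal) = true
          · rw [if_pos hgoal, if_pos hgoal]
          · rw [if_neg hgoal, if_neg hgoal]
            obtain ⟨hfi, hfp⟩ := pvFold_push_append (fun nb => nb ∈ r.2)
              (fun nb => (r.1 + (PySem.Dict.mk heuristic).getD nb 0, r.2 ++ [nb]))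
              ((PySem.Dict.mk graph).getD current []) pq' ((f0 :: fs).erase r) hinv' hperm'
            exact IH _ _ hfi hfp

-- ===== VERDICT (by name: the statement is the Claim_ definition above) =====
theorem branch_and_bound_heuristic_spec : Claim_equal_branch_and_bound_heuristic := by
  intro graph start goal heuristic _hdom _hpre
  unfold Spec_branch_and_bound_heuristic
  unfold branch_and_bound_heuristic branch_and_bound_heuristic_alt
  cases hs : (PySem.Dict.mk heuristic).get? start with
  | none => rfl
  | some h0 =>
    exact pvLoop_eq graph goal heuristic (pvFuel graph) [(h0, [start])] [(h0, [start])]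
      (by intro i j hj hc; simp at hj; omega) (List.Perm.refl _)
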